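-- pv_equiv track=rewrite | github.com/DeMeylab/2018---yUTR-calculator | Code/functions/library_tools.py | list_to_degenerate_formate
-- ===== SOURCE A (Python) =====
-- def remove_disfunctional_list(candidate_list):
-- 	new_candidate_list = []
-- 	for i in range(len(candidate_list)):
-- 		if len(candidate_list[i]) == 1 and isinstance(candidate_list[i],list):
-- 			new_candidate_list.append(candidate_list[i][0])
-- 		else:
-- 			new_candidate_list.append(candidate_list[i])
-- 	return new_candidate_list
--
-- def list_to_degenerate_formate(list_degenerate):
-- 	new_list_degenerate = list_degenerate[:]
-- 	degenerate_dict = {"N":["A","C","G","U"],"V":["A","C","G"],"H":["A","C","U"],"D":["A","G","U"],"B":["C","G","U"],"Y":["C","U"],"R":["A","G"],"K":["G","U"],"M":["A","C"],"S":["C","G"],"W":["A","U"],"A":"A","C":"C","G":"G","U":"U"}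
-- 	degenerate_nucleotide_places = [i for i in range(len(list_degenerate)) if len(list_degenerate[i]) > 1]
-- 	for i in degenerate_nucleotide_places:
-- 		for key in degenerate_dict.keys():
-- 			if set(degenerate_dict[key]) == set(list_degenerate[i]):
-- 				new_list_degenerate[i] = key
-- 	new_list_degenerate=remove_disfunctional_list(new_list_degenerate)
-- 	return ''.join(new_list_degenerate)
-- ===== SOURCE B (Python) =====
-- def list_to_degenerate_formate(list_degenerate):
-- 	rev = {"ACGU":"N","ACG":"V","ACU":"H","AGU":"D","CGU":"B","CU":"Y","AG":"R","GU":"K","AC":"M","CG":"S","AU":"W","A":"A","C":"C","G":"G","U":"U"}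
-- 	out = []
-- 	for e in list_degenerate:
-- 		if len(e) == 1:
-- 			out.append(e[0])
-- 		else:
-- 			out.append(rev[''.join(sorted(set(e)))])
-- 	return ''.join(out)
-- ===== Notes on version B (the rewrite author's own statement) =====
-- stated objective: simpler
-- what changed: Replaces the copy-then-index-patch pipeline (places list, nested per-position scan of the dict comparing sets, separate remove_disfunctional_list pass) by one accumulator loop that canonicalises each multi-entry element to its sorted-deduplicated nucleotide string and looks it up in a string-keyed reverse dict.
import Mathlib
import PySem

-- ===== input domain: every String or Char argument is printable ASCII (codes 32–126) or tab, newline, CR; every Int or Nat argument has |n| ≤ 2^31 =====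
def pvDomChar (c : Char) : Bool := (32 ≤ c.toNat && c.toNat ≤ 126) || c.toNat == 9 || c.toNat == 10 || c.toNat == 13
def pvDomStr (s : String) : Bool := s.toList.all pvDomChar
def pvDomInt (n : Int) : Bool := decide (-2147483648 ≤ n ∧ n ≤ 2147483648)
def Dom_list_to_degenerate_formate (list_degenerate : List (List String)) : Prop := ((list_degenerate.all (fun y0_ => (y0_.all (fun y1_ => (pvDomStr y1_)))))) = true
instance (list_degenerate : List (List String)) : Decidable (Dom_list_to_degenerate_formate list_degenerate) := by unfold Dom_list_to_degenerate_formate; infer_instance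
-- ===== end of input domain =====

-- B replaces A's copy-then-patch pipeline (places index list, nested dict scan per
-- degenerate position, separate remove_disfunctional_list pass) by one accumulator loop
-- that canonicalises each multi-entry element to its sorted nucleotide string and looks
-- that up in a string-keyed reverse dict; objective: simpler. Pre_ excludes exactly the
-- inputs where both Pythons raise (an element that is empty or a non-singleton with no
-- matching degenerate set: A's join raises TypeError, B's dict lookup raises KeyError).


-- ===== PORT A =====
-- the degenerate_dict literal; values are list-of-strings or a plain string (Python mixes both)
def degTable : List (String × (List String ⊕ String)) :=
  [("N", Sum.inl ["A","C","G","U"]), ("V", Sum.inl ["A","C","G"]), ("H", Sum.inl ["A","C","U"]),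
   ("D", Sum.inl ["A","G","U"]), ("B", Sum.inl ["C","G","U"]), ("Y", Sum.inl ["C","U"]),
   ("R", Sum.inl ["A","G"]), ("K", Sum.inl ["G","U"]), ("M", Sum.inl ["A","C"]),
   ("S", Sum.inl ["C","G"]), ("W", Sum.inl ["A","U"]),
   ("A", Sum.inr "A"), ("C", Sum.inr "C"), ("G", Sum.inr "G"), ("U", Sum.inr "U")]

-- set(value): a list value gives its set; a string value gives the set of its characters as 1-char strings
def valSet : (List String ⊕ String) → PySem.Set String
  | Sum.inl l => PySem.Set.ofList l
  | Sum.inr s => PySem.Set.ofList (s.toList.map (fun c => String.ofList [c]))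

def list_to_degenerate_formate (list_degenerate : List (List String)) : String :=
  -- new_list_degenerate = list_degenerate[:]; entries become String (a key) or List String (untouched)
  let new0 : List (String ⊕ List String) := list_degenerate.map Sum.inr
  -- degenerate_nucleotide_places
  let places := (List.range list_degenerate.length).filter
    (fun i => 1 < (list_degenerate.getD i []).length)
  -- for i in places: for key in dict: if set(dict[key]) == set(list_degenerate[i]): new[i] = key
  let new1 := places.foldl (fun acc i =>
    degTable.foldl (fun acc2 kv =>
      if PySem.Set.equal (valSet kv.2) (PySem.Set.ofList (list_degenerate.getD i []))
      then acc2.set i (Sum.inl kv.1) else acc2) acc) new0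
  -- remove_disfunctional_list: singleton lists become their element
  let new2 := new1.map (fun e => match e with
    | Sum.inr l => if l.length = 1 then Sum.inl (l.getD 0 "") else Sum.inr l
    | Sum.inl s => Sum.inl s)
  -- ''.join: raises TypeError if a list entry remains (those inputs are outside Pre_)
  if new2.all (fun e => match e with | Sum.inl _ => true | Sum.inr _ => false) then
    PySem.Str.join "" (new2.map (fun e => match e with | Sum.inl s => s | Sum.inr _ => ""))
  else ""

-- ===== PORT B =====
-- rev: the canonical sorted nucleotide string of each degenerate set, mapped to its code
def revTable : PySem.Dict String String := PySem.Dict.ofList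
  [("ACGU","N"),("ACG","V"),("ACU","H"),("AGU","D"),("CGU","B"),("CU","Y"),("AG","R"),
   ("GU","K"),("AC","M"),("CG","S"),("AU","W"),("A","A"),("C","C"),("G","G"),("U","U")]

def list_to_degenerate_formate_alt (list_degenerate : List (List String)) : String :=
  -- for e in list_degenerate: out.append(e[0]) / out.append(rev[''.join(sorted(set(e)))])
  -- rev[…] on a missing key is KeyError (outside Pre_), modelled by .getD ""
  let out := list_degenerate.foldl (fun out e =>
    if e.length = 1 then out ++ [e.getD 0 ""]
    else out ++ [PySem.Dict.getD revTable
      (PySem.Str.join "" (PySem.List.sorted (PySem.Set.ofList e) (fun x => x) false)) ""]) []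
  PySem.Str.join "" out

-- ===== PRECONDITION & SPEC =====
-- Pre_ excludes exactly the inputs on which A raises (TypeError in join): an element that is
-- empty or has several entries but matches no degenerate set; B raises KeyError there too.
def Pre_list_to_degenerate_formate (list_degenerate : List (List String)) : Prop :=
  ∀ e ∈ list_degenerate, e.length = 1 ∨
    (1 < e.length ∧ ∃ kv ∈ degTable, PySem.Set.equal (valSet kv.2) (PySem.Set.ofList e) = true)
instance (list_degenerate : List (List String)) : Decidable (Pre_list_to_degenerate_formate list_degenerate) := by unfold Pre_list_to_degenerate_formate; infer_instance
def pvWitness_list_to_degenerate_formate : List (List String) := [["A"], ["A","C","G","U"], ["C","U"], ["A","A"]]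

def Spec_list_to_degenerate_formate (list_degenerate : List (List String)) (out : String) : Prop := out = list_to_degenerate_formate_alt list_degenerate
instance (list_degenerate : List (List String)) (out : String) : Decidable (Spec_list_to_degenerate_formate list_degenerate out) := by unfold Spec_list_to_degenerate_formate; infer_instance

-- ===== CLAIM (what is proved, stated in full; the proofs are below) =====
def Claim_equal_list_to_degenerate_formate : Prop := ∀ (list_degenerate : List (List String)), Dom_list_to_degenerate_formate list_degenerate → Pre_list_to_degenerate_formate list_degenerate → Spec_list_to_degenerate_formate list_degenerate (list_to_degenerate_formate list_degenerate)

-- ===== LEMMAS AND PROOFS =====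

-- the match predicate 'set(dict[key]) == set(e)'
def qe (e : List String) (kv : String × (List String ⊕ String)) : Bool :=
  PySem.Set.equal (valSet kv.2) (PySem.Set.ofList e)

-- key assigned to a degenerate place (first = last match, the sets being pairwise distinct)
def lm (e : List String) : Option String := (degTable.find? (qe e)).map Prod.fst

-- A's per-element result
def fA (e : List String) : String :=
  if e.length = 1 then e.getD 0 "" else ((lm e).getD "")

-- B's per-element result
def fB (e : List String) : String :=
  if e.length = 1 then e.getD 0 ""
  else PySem.Dict.getD revTable
    (PySem.Str.join "" (PySem.List.sorted (PySem.Set.ofList e) (fun x => x) false)) ""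

lemma optfoldl_init {α β : Type} (q : α → Bool) (f : α → β) (t : List α) (o : Option β) :
    t.foldl (fun r x => if q x then some (f x) else r) o
      = (t.foldl (fun r x => if q x then some (f x) else r) none).or o := by
  induction t generalizing o with
  | nil => simp
  | cons x t ih =>
    simp only [List.foldl_cons]
    rw [ih, ih (if q x then some (f x) else none), Option.or_assoc]
    by_cases h : q x <;> simp [h]

-- A's inner scan, which patches index i on every match, equals one List.set by the last match
lemma foldl_set_eq_gen {α : Type} (p : α → Bool) (g : α → String) (i : Nat) :
    ∀ (tbl : List α) (acc : List (String ⊕ List String)),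
      tbl.foldl (fun acc2 kv => if p kv then acc2.set i (Sum.inl (g kv)) else acc2) acc
      = match tbl.foldl (fun r kv => if p kv then some (g kv) else r) none with
        | some k => acc.set i (Sum.inl k)
        | none => acc := by
  intro tbl
  induction tbl with
  | nil => intro acc; simp
  | cons kv t ih =>
    intro acc
    simp only [List.foldl_cons]
    by_cases h : p kv
    · simp only [h, if_true]
      rw [ih, optfoldl_init p g t (some (g kv))]
      cases ht : t.foldl (fun r kv => if p kv then some (g kv) else r) none <;>
        simp [List.set_set]
    · simp only [h]
      rw [ih]
      simp

-- last match = first match when at most one entry can match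
lemma lastM_eq_find_gen {α β : Type} (q : α → Bool) (f : α → β) :
    ∀ (t : List α), t.Pairwise (fun x y => ¬(q x = true ∧ q y = true)) →
      t.foldl (fun r x => if q x then some (f x) else r) none = (t.find? q).map f := by
  intro t hp
  induction t with
  | nil => simp
  | cons x t ih =>
    rcases List.pairwise_cons.mp hp with ⟨hx, ht⟩
    simp only [List.foldl_cons]
    rw [optfoldl_init]
    by_cases h : q x
    · have hnone : t.foldl (fun r x => if q x then some (f x) else r) none = none := by
        rw [ih ht]
        simp [List.find?_eq_none.mpr (fun y hy => by simpa using fun hqy => hx y hy ⟨h, hqy⟩)]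
      simp [hnone, h, List.find?_cons_of_pos (by simpa using h)]
    · simp [h, ih ht, List.find?_cons_of_neg (by simpa using h)]

-- the fifteen degenerate sets are pairwise distinct as sets
lemma degPairwise : degTable.Pairwise (fun x y => PySem.Set.equal (valSet x.2) (valSet y.2) = false) := by decide

lemma uniq (e : List String) : degTable.Pairwise (fun x y => ¬(qe e x = true ∧ qe e y = true)) := by
  refine degPairwise.imp ?_
  intro x y hf ⟨h1, h2⟩
  unfold qe at h1 h2
  rw [PySem.Set.equal_iff] at h1 h2
  have : PySem.Set.equal (valSet x.2) (valSet y.2) = true := by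
    rw [PySem.Set.equal_iff]; exact fun z => (h1 z).trans (h2 z).symm
  simp [hf] at this

-- find? returns THE unique match
lemma find_unique {α : Type} (q : α → Bool) :
    ∀ (l : List α), l.Pairwise (fun x y => ¬(q x = true ∧ q y = true)) →
    ∀ a ∈ l, q a = true → l.find? q = some a := by
  intro l
  induction l with
  | nil => intro _ a ha; simp at ha
  | cons x t ih =>
    intro hp a ha hqa
    rcases List.pairwise_cons.mp hp with ⟨hx, ht⟩
    rcases List.mem_cons.mp ha with rfl | hat
    · exact List.find?_cons_of_pos hqa
    · have hqx : q x = false := by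
        by_contra h
        exact hx a hat ⟨by simpa using h, hqa⟩
      rw [List.find?_cons_of_neg (by simp [hqx])]
      exact ih ht a hat hqa

lemma set_getElem?_self {α : Type} (l : List α) (i : Nat) (a : α) :
    (l.set i a)[i]? = if i < l.length then some a else none := by
  by_cases h : i < l.length
  · simp [h]
  · simp [h]

-- the outer loop over the (Nodup) places list, read back pointwise
lemma outer_get (ld : List (List String)) :
    ∀ (places : List Nat), places.Nodup →
    ∀ (acc : List (String ⊕ List String)) (j : Nat),
      (places.foldl (fun acc i => match lm (ld.getD i []) with
        | some k => acc.set i (Sum.inl k) | none => acc) acc)[j]?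
      = match (if j ∈ places then lm (ld.getD j []) else none) with
        | some k => (acc.set j (Sum.inl k))[j]?
        | none => acc[j]? := by
  intro places
  induction places with
  | nil => intro _ acc j; simp
  | cons i t ih =>
    intro hnd acc j
    rcases List.nodup_cons.mp hnd with ⟨hi, ht⟩
    simp only [List.foldl_cons]
    rw [ih ht]
    by_cases hji : j = i
    · subst hji
      have hjt : j ∉ t := hi
      simp only [hjt, List.mem_cons, true_or, if_true]
      cases h : lm (ld.getD j []) <;> simp
    · by_cases hjt : j ∈ t
      · simp only [hjt, if_true, List.mem_cons, or_true, if_true]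
        cases h : lm (ld.getD j []) with
        | none =>
          cases h2 : lm (ld.getD i []) <;> simp [List.getElem?_set_ne (fun he => hji he.symm)]
        | some k =>
          cases h2 : lm (ld.getD i []) with
          | none => simp
          | some k2 =>
            simp only []
            rw [set_getElem?_self, set_getElem?_self]
            simp [List.length_set]
      · have : j ∉ i :: t := by simp [hji, hjt]
        simp only [this, hjt, if_false]
        cases h2 : lm (ld.getD i []) <;>
          simp [List.getElem?_set_ne (fun he => hji he.symm)]

-- A's inner dict scan collapses to a single set by the (unique) matching key
lemma hG_eq (ld : List (List String)) :
    (fun (acc : List (String ⊕ List String)) (i : Nat) =>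
      degTable.foldl (fun acc2 kv =>
        if PySem.Set.equal (valSet kv.2) (PySem.Set.ofList (ld.getD i []))
        then acc2.set i (Sum.inl kv.1) else acc2) acc)
    = (fun acc i => match lm (ld.getD i []) with
        | some k => acc.set i (Sum.inl k) | none => acc) := by
  funext acc i
  rw [foldl_set_eq_gen (fun kv => PySem.Set.equal (valSet kv.2) (PySem.Set.ofList (ld.getD i [])))
        (fun kv => kv.1) i degTable acc]
  have hu := uniq (ld.getD i [])
  simp only [qe] at hu
  rw [lastM_eq_find_gen _ _ _ hu]
  rfl

-- the whole A-side list before join equals A's per-element map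
lemma hmain (ld : List (List String)) (hpre : Pre_list_to_degenerate_formate ld) :
    ((((List.range ld.length).filter (fun i => 1 < (ld.getD i []).length)).foldl
      (fun acc i => match lm (ld.getD i []) with
        | some k => acc.set i (Sum.inl k) | none => acc) (ld.map Sum.inr)).map
      (fun e => match e with
        | Sum.inr l => if l.length = 1 then Sum.inl (l.getD 0 "") else Sum.inr l
        | Sum.inl s => Sum.inl s))
    = ld.map (fun e => Sum.inl (fA e)) := by
  apply List.ext_getElem?
  intro j
  rw [List.getElem?_map, List.getElem?_map]
  rw [outer_get ld _ ((List.nodup_range).filter _) _ j]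
  by_cases hj : j < ld.length
  · have hmem : ld[j] ∈ ld := List.getElem_mem _
    have hgd : ld.getD j [] = ld[j] := by
      simp [List.getD_eq_getElem?_getD, List.getElem?_eq_getElem hj]
    have hgd2 : ld[j]?.getD ([] : List String) = ld[j] := by
      rw [List.getElem?_eq_getElem hj]; rfl
    rcases hpre _ hmem with h1 | ⟨hlen, kv, hkv, hq⟩
    · have hnp : j ∉ (List.range ld.length).filter (fun i => 1 < (ld.getD i []).length) := by
        simp [List.mem_filter, hgd2, h1]
      rw [if_neg hnp]
      simp [List.getElem?_eq_getElem hj, fA, h1]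
    · have hp : j ∈ (List.range ld.length).filter (fun i => 1 < (ld.getD i []).length) := by
        simp [List.mem_filter, List.mem_range, hj, hlen]
      rw [if_pos hp]
      have hlm : ∃ k, lm (ld.getD j []) = some k := by
        have hs : (degTable.find? (qe (ld.getD j []))).isSome :=
          List.find?_isSome.mpr ⟨kv, hkv, by simp only [qe]; rw [hgd]; exact hq⟩
        rcases Option.isSome_iff_exists.mp hs with ⟨p, hpeq⟩
        exact ⟨p.1, by unfold lm; rw [hpeq]; rfl⟩
      rcases hlm with ⟨k, hk⟩
      rw [hk]
      have hne1 : ld[j].length ≠ 1 := by omega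
      have hk2 : lm ld[j] = some k := hgd ▸ hk
      simp [List.length_map, hj, fA, hk2, hne1]
  · have hnp : j ∉ (List.range ld.length).filter (fun i => 1 < (ld.getD i []).length) := by
      simp [List.mem_filter, List.mem_range]; omega
    rw [if_neg hnp]
    simp [List.getElem?_eq_none (by simpa using Nat.le_of_not_lt hj)]

-- A's output on Pre_ is the join of the per-element map
lemma hA (ld : List (List String)) (hpre : Pre_list_to_degenerate_formate ld) :
    list_to_degenerate_formate ld = PySem.Str.join "" (ld.map fA) := by
  simp only [list_to_degenerate_formate]
  rw [hG_eq ld, hmain ld hpre]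
  simp [List.all_map, List.map_map, Function.comp_def]

-- B's loop is the join of the per-element map
lemma hB (ld : List (List String)) :
    list_to_degenerate_formate_alt ld = PySem.Str.join "" (ld.map fB) := by
  simp only [list_to_degenerate_formate_alt]
  have : (fun (out : List String) (e : List String) =>
      if e.length = 1 then out ++ [e.getD 0 ""]
      else out ++ [PySem.Dict.getD revTable
        (PySem.Str.join "" (PySem.List.sorted (PySem.Set.ofList e) (fun x => x) false)) ""])
      = (fun out e => out ++ [fB e]) := by
    funext out e
    by_cases h : e.length = 1 <;> simp [fB, h]
  rw [this, PySem.List.foldl_append_singleton_eq_map]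
  simp

-- sorted(set(e)) is the named nucleotide list whenever set(e) has exactly its members
lemma canon_of_equal (e : List String) (v : List String)
    (hnd : v.Nodup) (hsort : v.Pairwise (· < ·))
    (hmem : ∀ x, x ∈ PySem.Set.ofList e ↔ x ∈ v) :
    PySem.List.sorted (PySem.Set.ofList e) (fun x => x) false = v := by
  apply PySem.List.sorted_eq_of_perm_of_pairwise_lt
  · exact (List.perm_ext_iff_of_nodup hnd (PySem.Set.nodup_ofList e)).mpr
      (fun x => (hmem x).symm)
  · exact hsort

-- every row's value list is sorted, duplicate-free, and its joined string keys revTable at its code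
lemma rows_ok : ∀ kv ∈ degTable, (valSet kv.2).Nodup ∧ (valSet kv.2).Pairwise (· < ·) ∧
    PySem.Dict.getD revTable (PySem.Str.join "" (valSet kv.2)) "" = kv.1 := by
  have h : ∀ kv ∈ degTable, (valSet kv.2).Nodup ∧
      (valSet kv.2).Pairwise (fun a b => a.toList < b.toList) ∧
      PySem.Dict.getD revTable (PySem.Str.join "" (valSet kv.2)) "" = kv.1 := by decide
  intro kv hkv
  obtain ⟨h1, h2, h3⟩ := h kv hkv
  exact ⟨h1, h2.imp (fun hx => String.lt_iff_toList_lt.mpr hx), h3⟩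

-- one table row: the canonical lookup yields the key
lemma getD_canon (e : List String) (v : List String) (key : String)
    (hnd : v.Nodup) (hsort : v.Pairwise (· < ·))
    (hmem : ∀ x, x ∈ PySem.Set.ofList e ↔ x ∈ v)
    (hlook : PySem.Dict.getD revTable (PySem.Str.join "" v) "" = key) :
    PySem.Dict.getD revTable
      (PySem.Str.join "" (PySem.List.sorted (PySem.Set.ofList e) (fun x => x) false)) "" = key := by
  rw [canon_of_equal e v hnd hsort hmem, hlook]

-- on every element admitted by Pre_, the two per-element results agree
lemma fA_eq_fB (e : List String)
    (hpre : e.length = 1 ∨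
      (1 < e.length ∧ ∃ kv ∈ degTable, PySem.Set.equal (valSet kv.2) (PySem.Set.ofList e) = true)) :
    fA e = fB e := by
  rcases hpre with h1 | ⟨hlen, kv, hkv, hq⟩
  · simp [fA, fB, h1]
  · have hne1 : e.length ≠ 1 := by omega
    have hfind : lm e = some kv.1 := by
      unfold lm
      rw [find_unique (qe e) degTable (uniq e) kv hkv (by unfold qe; exact hq)]
      rfl
    simp only [fA, fB, hne1, if_false, hfind, Option.getD_some]
    have hmem : ∀ x, x ∈ PySem.Set.ofList e ↔ x ∈ valSet kv.2 := by
      intro x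
      exact ((PySem.Set.equal_iff _ _).mp hq x).symm
    obtain ⟨hnd, hsort, hlook⟩ := rows_ok kv hkv
    exact (getD_canon e (valSet kv.2) kv.1 hnd hsort hmem hlook).symm

-- ===== VERDICT (by name: the statement is the Claim_ definition above) =====
theorem list_to_degenerate_formate_spec : Claim_equal_list_to_degenerate_formate := by
  intro ld _ hpre
  simp only [Spec_list_to_degenerate_formate]
  rw [hA ld hpre, hB ld]
  exact congrArg _ (List.map_congr_left (fun e he => fA_eq_fB e (hpre e he)))
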